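-- pv_equiv track=rewrite | github.com/sshaayan/Checkers-AI | main.py | defensiveRow
-- ===== SOURCE A (Python) =====
-- startRowMaskW = 0b00000000000000000000000000000001111
--
-- startRowMaskB = 0b11110000000000000000000000000000000
--
-- def defensiveRow(whiteParam, blackParam, kingParam, colorParam):
--     defVal = 0
--     currPieces = whiteParam & startRowMaskW
--     if colorParam == "BLACK":
--         currPieces = blackParam & startRowMaskB
--
--     for bit in bin(currPieces):
--         defVal += (1 if bit == '1' else 0)
--
--     return defVal
-- ===== SOURCE B (Python) =====
-- startRowMaskW = 0b00000000000000000000000000000001111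
--
-- startRowMaskB = 0b11110000000000000000000000000000000
--
-- def defensiveRow(whiteParam, blackParam, kingParam, colorParam):
--     currPieces = whiteParam & startRowMaskW
--     if colorParam == "BLACK":
--         currPieces = blackParam & startRowMaskB
--     defVal = 0
--     while currPieces:
--         currPieces &= currPieces - 1
--         defVal += 1
--     return defVal
-- ===== Notes on version B (the rewrite author's own statement) =====
-- stated objective: idiomatic
-- what changed: Replaces building Python's binary-string representation and scanning its characters with Brian Kernighan's bit-clearing loop (currPieces &= currPieces - 1), counting set bits by integer arithmetic with no string at all.
import Mathlib
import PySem

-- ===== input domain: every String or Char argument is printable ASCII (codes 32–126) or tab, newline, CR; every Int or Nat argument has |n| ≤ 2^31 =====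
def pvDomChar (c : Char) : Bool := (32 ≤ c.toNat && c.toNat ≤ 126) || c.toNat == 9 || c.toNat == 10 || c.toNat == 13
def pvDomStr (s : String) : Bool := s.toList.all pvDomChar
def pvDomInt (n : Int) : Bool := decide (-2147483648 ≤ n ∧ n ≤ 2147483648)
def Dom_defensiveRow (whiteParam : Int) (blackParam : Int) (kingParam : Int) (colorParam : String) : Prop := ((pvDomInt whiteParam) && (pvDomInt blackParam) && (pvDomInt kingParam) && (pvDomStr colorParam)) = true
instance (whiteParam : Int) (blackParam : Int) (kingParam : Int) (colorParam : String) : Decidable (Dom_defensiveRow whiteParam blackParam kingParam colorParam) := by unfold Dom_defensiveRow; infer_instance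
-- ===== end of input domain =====

-- B replaces the bin()-string character scan with Kernighan's bit-clearing loop (idiomatic popcount, no string).

-- ===== PORT A =====
def startRowMaskW : Int := 0b00000000000000000000000000000001111
def startRowMaskB : Int := 0b11110000000000000000000000000000000

-- hand port of Python's bin() for a NONNEGATIVE int (exact there: "0b" ++ binary digits, "0b0" for 0);
-- both masks are nonnegative, so currPieces is always nonnegative in Python and .toNat is exact.
def binDigits (n : Nat) : List Char :=
  if n = 0 then [] else binDigits (n / 2) ++ [if n % 2 = 1 then '1' else '0']

def pyBinNonneg (n : Nat) : List Char :=
  '0' :: 'b' :: (if n = 0 then ['0'] else binDigits n)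

def defensiveRow (whiteParam : Int) (blackParam : Int) (kingParam : Int) (colorParam : String) : Int :=
  let defVal : Int := 0
  let currPieces := PySem.Int.band whiteParam startRowMaskW
  let currPieces := if colorParam == "BLACK" then PySem.Int.band blackParam startRowMaskB else currPieces
  (pyBinNonneg currPieces.toNat).foldl (fun defVal bit => defVal + (if bit == '1' then 1 else 0)) defVal

-- ===== PORT B =====
-- Kernighan loop: clears the lowest set bit each step; currPieces is nonnegative (see above), so .toNat is exact.
def kern (m : Nat) (defVal : Int) : Int :=
  if h : m = 0 then defVal else kern (m &&& (m - 1)) (defVal + 1)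
termination_by m
decreasing_by
  have h1 : m &&& (m - 1) ≤ m - 1 := Nat.and_le_right
  omega

def defensiveRow_alt (whiteParam : Int) (blackParam : Int) (kingParam : Int) (colorParam : String) : Int :=
  let currPieces := PySem.Int.band whiteParam startRowMaskW
  let currPieces := if colorParam == "BLACK" then PySem.Int.band blackParam startRowMaskB else currPieces
  kern currPieces.toNat 0

-- ===== PRECONDITION & SPEC =====
def Spec_defensiveRow (whiteParam : Int) (blackParam : Int) (kingParam : Int) (colorParam : String) (out : Int) : Prop := out = defensiveRow_alt whiteParam blackParam kingParam colorParam
instance (whiteParam : Int) (blackParam : Int) (kingParam : Int) (colorParam : String) (out : Int) : Decidable (Spec_defensiveRow whiteParam blackParam kingParam colorParam out) := by unfold Spec_defensiveRow; infer_instance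

-- ===== CLAIM (what is proved, stated in full; the proofs are below) =====
def Claim_equal_defensiveRow : Prop := ∀ (whiteParam : Int) (blackParam : Int) (kingParam : Int) (colorParam : String), Dom_defensiveRow whiteParam blackParam kingParam colorParam → Spec_defensiveRow whiteParam blackParam kingParam colorParam (defensiveRow whiteParam blackParam kingParam colorParam)

-- ===== LEMMAS AND PROOFS =====

-- number of '1' digits in binDigits n, as a Nat
def pcnt (n : Nat) : Nat := (binDigits n).count '1'

theorem pcnt_zero : pcnt 0 = 0 := by simp [pcnt, binDigits]

theorem pcnt_pos (n : Nat) (h : n ≠ 0) : pcnt n = pcnt (n / 2) + n % 2 := by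
  unfold pcnt
  rw [binDigits]
  simp only [h, if_false, List.count_append]
  rcases Nat.mod_two_eq_zero_or_one n with h2 | h2 <;> simp [h2, List.count_cons]

theorem pcnt_double (m : Nat) : pcnt (2 * m) = pcnt m := by
  rcases Nat.eq_zero_or_pos m with rfl | hm
  · simp
  · rw [pcnt_pos (2 * m) (by omega)]
    simp [Nat.mul_div_cancel_left _ (by norm_num : 0 < 2), Nat.mul_mod_right]

theorem odd_land (m : Nat) : (2 * m + 1) &&& (2 * m) = 2 * m := by
  apply Nat.eq_of_testBit_eq
  intro i
  rw [Nat.testBit_land]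
  cases i with
  | zero => simp [Nat.testBit_zero]
  | succ i =>
      simp [Nat.testBit_add_one,
        Nat.mul_div_cancel_left _ (by norm_num : 0 < 2),
        (by omega : (2 * m + 1) / 2 = m)]

theorem even_land (m : Nat) (hm : 0 < m) : (2 * m) &&& (2 * m - 1) = 2 * (m &&& (m - 1)) := by
  apply Nat.eq_of_testBit_eq
  intro i
  rw [Nat.testBit_land]
  cases i with
  | zero => simp [Nat.testBit_zero]
  | succ i =>
      simp [Nat.testBit_add_one, Nat.testBit_land,
        Nat.mul_div_cancel_left _ (by norm_num : 0 < 2),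
        (by omega : (2 * m - 1) / 2 = m - 1),
        (by omega : 2 * (m &&& (m - 1)) / 2 = m &&& (m - 1))]

theorem pcnt_clear : ∀ n : Nat, 0 < n → pcnt (n &&& (n - 1)) + 1 = pcnt n := by
  intro n
  induction n using Nat.strong_induction_on with
  | _ n ih =>
    intro hn
    rcases Nat.even_or_odd n with ⟨m, hm⟩ | ⟨m, hm⟩
    · -- n = 2 * m, m > 0
      have hm' : 0 < m := by omega
      have hn2 : n = 2 * m := by omega
      subst hn2
      rw [even_land m hm', pcnt_double, pcnt_double]
      exact ih m (by omega) hm'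
    · -- n = 2 * m + 1
      subst hm
      have h1 : (2 * m + 1) &&& (2 * m) = 2 * m := odd_land m
      have h2 : 2 * m + 1 - 1 = 2 * m := by omega
      rw [h2, h1, pcnt_double, pcnt_pos (2 * m + 1) (by omega),
        (by omega : (2 * m + 1) / 2 = m), (by omega : (2 * m + 1) % 2 = 1)]

theorem kern_eq_pcnt : ∀ (n : Nat) (a : Int), kern n a = a + (pcnt n : Int) := by
  intro n
  induction n using Nat.strong_induction_on with
  | _ n ih =>
    intro a
    rw [kern]
    by_cases h : n = 0
    · simp [h, pcnt_zero]
    · simp only [h, dif_neg, not_false_iff]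
      have hlt : n &&& (n - 1) < n := by
        have : n &&& (n - 1) ≤ n - 1 := Nat.and_le_right
        omega
      rw [ih _ hlt]
      have := pcnt_clear n (by omega)
      push_cast
      omega

theorem foldl_count (l : List Char) (a : Int) :
    l.foldl (fun defVal bit => defVal + (if bit == '1' then 1 else 0)) a
      = a + (l.count '1' : Int) := by
  induction l generalizing a with
  | nil => simp
  | cons c t ih =>
      simp only [List.foldl_cons, ih, List.count_cons]
      by_cases h : c = '1' <;> simp [h, beq_iff_eq] <;> push_cast <;> ring

theorem count_pyBin (n : Nat) : ((pyBinNonneg n).count '1' : Nat) = pcnt n := by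
  unfold pyBinNonneg
  by_cases h : n = 0
  · simp [h, pcnt_zero, List.count_cons]
  · simp [h, pcnt, List.count_cons]

-- ===== VERDICT (by name: the statement is the Claim_ definition above) =====
theorem defensiveRow_spec : Claim_equal_defensiveRow := by
  intro w b k c _
  unfold Spec_defensiveRow defensiveRow defensiveRow_alt
  simp only []
  rw [foldl_count, kern_eq_pcnt, count_pyBin]
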